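-- pv_equiv track=rewrite | github.com/vajradevam/ai-lab | Lab-Project-1/Solver-Part-1/solvers.py | find_path_dfs
-- ===== SOURCE A (Python) =====
-- def find_path_dfs(maze):
--     """
--     Find the path from 'S' to 'E' using Depth-First Search and return all states.
--
--     Args:
--         maze (list): The maze represented as a 2D list.
--
--     Returns:
--         tuple: (final_maze, maze_states) where final_maze is the solved maze and
--                maze_states is a list of all intermediate states. Returns (None, [])
--                if no path exists.
--     """
--     rows, cols = len(maze), len(maze[0])
--     directions = [(-1, 0), (1, 0), (0, -1), (0, 1)]  # Up, Down, Left, Right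
--     maze_states = []  # Store all intermediate states
--
--     # Locate 'S' and 'E'
--     start = end = None
--     for i in range(rows):
--         for j in range(cols):
--             if maze[i][j] == 'S':
--                 start = (i, j)
--             if maze[i][j] == 'E':
--                 end = (i, j)
--
--     if not start or not end:
--         return []
--
--     # DFS implementation
--     stack = [(start, [])]
--     visited = set()
--
--     while stack:
--         (x, y), path = stack.pop()
--
--         if (x, y) in visited:
--             continue
--
--         visited.add((x, y))
--         path = path + [(x, y)]
--
--         # Create a copy of the maze for this state
--         maze_copy = [row[:] for row in maze]
--         for px, py in path:
--             if maze_copy[px][py] == '.':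
--                 maze_copy[px][py] = '@'
--         maze_states.append(maze_copy)  # Store the current state
--
--         if (x, y) == end:
--             # Mark the final path in the maze
--             for px, py in path:
--                 if maze[px][py] == '.':
--                     maze[px][py] = 'p'
--             # Store the final maze
--             maze_states.append(maze)
--             return maze_states
--
--         for dx, dy in directions:
--             nx, ny = x + dx, y + dy
--             if 0 <= nx < rows and 0 <= ny < cols and maze[nx][ny] in {'.', 'E'}:
--                 stack.append(((nx, ny), path))
--
--     return []
-- ===== SOURCE B (Python) =====
-- # B: two-phase recursive DFS — phase 1 collects the visit-order paths (dfs returning the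
-- # winning path), phase 2 renders every snapshot by index/membership mapping; S/E located by
-- # a backwards scan returning the first match (= A's last-overwrite).
-- # Return-value equivalence only: A additionally mutates `maze` in place ('p' marks) on success; B does not.
-- def find_path_dfs(maze):
--     rows, cols = len(maze), len(maze[0])
--
--     def locate(target):
--         for i in reversed(range(rows)):
--             for j in reversed(range(cols)):
--                 if maze[i][j] == target:
--                     return (i, j)
--         return None
--
--     start, end = locate('S'), locate('E')
--     if not start or not end:
--         return []
--
--     visited = set()
--     paths = []
--
--     def dfs(cell, path):
--         if cell in visited:
--             return None
--         visited.add(cell)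
--         path = path + [cell]
--         paths.append(path)
--         if cell == end:
--             return path
--         x, y = cell
--         for dx, dy in ((0, 1), (0, -1), (1, 0), (-1, 0)):
--             nx, ny = x + dx, y + dy
--             if 0 <= nx < rows and 0 <= ny < cols and maze[nx][ny] in ('.', 'E'):
--                 win = dfs((nx, ny), path)
--                 if win is not None:
--                     return win
--         return None
--
--     win = dfs(start, [])
--     if win is None:
--         return []
--
--     def render(path, mark):
--         return [[mark if ch == '.' and (i, j) in path else ch
--                  for j, ch in enumerate(row)] for i, row in enumerate(maze)]
--
--     return [render(p, '@') for p in paths] + [render(win, 'p')]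
-- ===== Notes on version B (the rewrite author's own statement) =====
-- stated objective: alternative
-- what changed: A's single iterative loop (explicit stack of (cell, path) pairs, painting and appending a maze snapshot per pop) is replaced by a two-phase decomposition: a recursive dfs(cell, path) that only collects the visit-order paths and returns the winning path, then a second pass rendering each snapshot by an enumerate/membership comprehension; S and E are found by a backwards scan returning the first match instead of a forward scan with overwriting. Note A also mutates the input maze in place on success ('p' marks) while B leaves it untouched (return values are identical).
import Mathlib
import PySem

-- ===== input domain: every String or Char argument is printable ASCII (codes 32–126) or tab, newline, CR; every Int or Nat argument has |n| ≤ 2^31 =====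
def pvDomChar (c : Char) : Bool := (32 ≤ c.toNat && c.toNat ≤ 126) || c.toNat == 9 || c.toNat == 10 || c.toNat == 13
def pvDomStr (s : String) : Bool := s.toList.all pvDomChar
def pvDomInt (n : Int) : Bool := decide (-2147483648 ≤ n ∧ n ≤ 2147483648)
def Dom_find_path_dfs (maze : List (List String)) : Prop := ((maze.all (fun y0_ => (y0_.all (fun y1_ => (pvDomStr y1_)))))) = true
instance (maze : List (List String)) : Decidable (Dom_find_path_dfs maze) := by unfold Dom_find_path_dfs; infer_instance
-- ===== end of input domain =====

-- B is a two-phase decomposition: a recursive DFS first collects the visit-order paths (and the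
-- winning path), then every snapshot is rendered by an index/membership map; S/E are located by a
-- backwards scan (first match = A's last overwrite).  Alternative decomposition, same cost.
-- Return-value equivalence only: Python A additionally mutates `maze` in place ('p' marks) on success; B does not.

-- ===== PORT A =====

-- maze[i][j] for in-range indices (A only reads in range; out of range never happens under Pre_)
def pvGetA (m : List (List String)) (i j : Int) : String :=
  (PySem.List.pyGet? ((PySem.List.pyGet? m i).getD []) j).getD ""

-- maze[i][j] = v; A only assigns at in-range nonnegative indices, where .toNat/.set are exact
def pvSetA (m : List (List String)) (i j : Int) (v : String) : List (List String) :=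
  m.set i.toNat ((m.getD i.toNat []).set j.toNat v)

-- `maze_copy = [row[:] for row in maze]` (identity on values) followed by the marking loop
def pvMarkA (m : List (List String)) (path : List (Int × Int)) (v : String) : List (List String) :=
  path.foldl (fun mc p => if pvGetA mc p.1 p.2 = "." then pvSetA mc p.1 p.2 v else mc) m

def pvDirsA : List (Int × Int) := [(-1, 0), (1, 0), (0, -1), (0, 1)]

-- A's while-loop.  The stack is kept TOP-AT-HEAD (Python appends/pops at the right end; reversed
-- representation, same contents).  `fuel` only bounds the number of iterations; it is chosen large
-- enough that it is never exhausted (each iteration pops one entry, and at most 4·rows·cols+1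
-- entries are ever pushed).
def pvLoopA (maze : List (List String)) (rows cols : Int) (endP : Int × Int) :
    Nat → List ((Int × Int) × List (Int × Int)) → PySem.Set (Int × Int) →
    List (List (List String)) → List (List (List String))
  | _, [], _, _ => []
  | 0, _ :: _, _, _ => []
  | fuel + 1, (c, path) :: rest, visited, states =>
    if PySem.Set.contains visited c then
      pvLoopA maze rows cols endP fuel rest visited states
    else
      let visited' := PySem.Set.add visited c
      let path' := path ++ [c]
      let states' := states ++ [pvMarkA maze path' "@"]
      if c = endP then states' ++ [pvMarkA maze path' "p"]
      else
        let stack' := pvDirsA.foldl (fun st d =>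
          let n : Int × Int := (c.1 + d.1, c.2 + d.2)
          if 0 ≤ n.1 ∧ n.1 < rows ∧ 0 ≤ n.2 ∧ n.2 < cols ∧
              (pvGetA maze n.1 n.2 = "." ∨ pvGetA maze n.1 n.2 = "E") then (n, path') :: st else st) rest
        pvLoopA maze rows cols endP fuel stack' visited' states'

def find_path_dfs (maze : List (List String)) : List (List (List String)) :=
  let rows : Int := maze.length
  let cols : Int := (maze.headD []).length   -- len(maze[0]); raises IndexError on [] in Python (excluded by Pre_)
  let se : Option (Int × Int) × Option (Int × Int) :=
    (PySem.List.pyRange 0 rows 1).foldl (fun se i =>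
      (PySem.List.pyRange 0 cols 1).foldl (fun (se : Option (Int × Int) × Option (Int × Int)) j =>
        let se1 := if pvGetA maze i j = "S" then (some (i, j), se.2) else se
        if pvGetA maze i j = "E" then (se1.1, some (i, j)) else se1) se) (none, none)
  match se with
  | (some s, some e) =>
    pvLoopA maze rows cols e (5 * (rows.toNat * cols.toNat) + 2) [(s, [])] PySem.Set.empty []
  | _ => []

-- ===== PORT B =====

-- maze[i][j] (B reads in range only, like A)
def pvCellB (m : List (List String)) (i j : Int) : String :=
  (PySem.List.pyGet? ((PySem.List.pyGet? m i).getD []) j).getD ""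

-- locate(target): nested `for i in reversed(range(rows)): for j in reversed(range(cols))` with an
-- early `return (i, j)` — ported exactly as find? over the reversed row-major cell list
def pvLocateB (m : List (List String)) (rows cols : Int) (t : String) : Option (Int × Int) :=
  (((PySem.List.pyRange 0 rows 1).reverse).flatMap (fun i =>
      ((PySem.List.pyRange 0 cols 1).reverse).map (fun j => ((i : Int), j)))).find?
    (fun p => pvCellB m p.1 p.2 == t)

def pvDirsB : List (Int × Int) := [(0, 1), (0, -1), (1, 0), (-1, 0)]

-- phase 1: dfs(cell, path) — returns (visited, paths, winning path or none); the neighbour `for`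
-- with `if win is not None: return win` is the foldl whose accumulator short-circuits on `some`
def pvDfsB (maze : List (List String)) (rows cols : Int) (endP : Int × Int) :
    Nat → (Int × Int) → List (Int × Int) → PySem.Set (Int × Int) → List (List (Int × Int)) →
    PySem.Set (Int × Int) × List (List (Int × Int)) × Option (List (Int × Int))
  | 0, _, _, V, ps => (V, ps, none)
  | fuel + 1, c, path, V, ps =>
    if PySem.Set.contains V c then (V, ps, none)
    else
      let V' := PySem.Set.add V c
      let path' := path ++ [c]
      let ps' := ps ++ [path']
      if c = endP then (V', ps', some path')
      else
        pvDirsB.foldl (fun acc d =>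
          match acc with
          | (v, q, some w) => (v, q, some w)
          | (v, q, none) =>
            let n : Int × Int := (c.1 + d.1, c.2 + d.2)
            if 0 ≤ n.1 ∧ n.1 < rows ∧ 0 ≤ n.2 ∧ n.2 < cols ∧
                (pvCellB maze n.1 n.2 = "." ∨ pvCellB maze n.1 n.2 = "E") then
              pvDfsB maze rows cols endP fuel n path' v q
            else (v, q, none)) (V', ps', none)

-- phase 2: render(path, mark) — the enumerate/enumerate comprehension
def pvRenderB (m : List (List String)) (path : List (Int × Int)) (mark : String) : List (List String) :=
  (PySem.List.enumerate m).map (fun ir =>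
    (PySem.List.enumerate ir.2).map (fun jc =>
      if jc.2 = "." ∧ (ir.1, jc.1) ∈ path then mark else jc.2))

def find_path_dfs_alt (maze : List (List String)) : List (List (List String)) :=
  let rows : Int := maze.length
  let cols : Int := (maze.headD []).length
  match pvLocateB maze rows cols "S" with
  | none => []
  | some s =>
    match pvLocateB maze rows cols "E" with
    | none => []
    | some e =>
      match pvDfsB maze rows cols e (rows.toNat * cols.toNat + 1) s [] PySem.Set.empty [] with
      | (_, ps, some w) =>
        ps.map (fun p => pvRenderB maze p "@") ++ [pvRenderB maze w "p"]
      | (_, _, none) => []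

-- ===== PRECONDITION & SPEC =====

-- Pre_ excludes exactly the inputs on which Python A raises IndexError: the empty maze
-- (len(maze[0])) and mazes with a row shorter than the first row (the S/E scan indexes
-- maze[i][j] for every j < len(maze[0])).  Python B raises on exactly the same inputs.
def Pre_find_path_dfs (maze : List (List String)) : Prop :=
  maze ≠ [] ∧ ∀ row ∈ maze, (maze.headD []).length ≤ row.length
instance (maze : List (List String)) : Decidable (Pre_find_path_dfs maze) := by
  unfold Pre_find_path_dfs; infer_instance

def pvWitness_find_path_dfs : List (List String) := [["S", "."], [".", "E"]]

def Spec_find_path_dfs (maze : List (List String)) (out : List (List (List String))) : Prop := out = find_path_dfs_alt maze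
instance (maze : List (List String)) (out : List (List (List String))) : Decidable (Spec_find_path_dfs maze out) := by unfold Spec_find_path_dfs; infer_instance

-- ===== CLAIM (what is proved, stated in full; the proofs are below) =====
def Claim_equal_find_path_dfs : Prop := ∀ (maze : List (List String)), Dom_find_path_dfs maze → Pre_find_path_dfs maze → Spec_find_path_dfs maze (find_path_dfs maze)

-- ===== LEMMAS AND PROOFS =====

lemma pvCellB_eq : pvCellB = pvGetA := rfl

-- the in-bounds cells in row-major order, and how many of them are still unvisited
def pvGrid (rows cols : Int) : List (Int × Int) :=
  (PySem.List.pyRange 0 rows 1).flatMap (fun i => (PySem.List.pyRange 0 cols 1).map (fun j => (i, j)))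

def pvUnvis (rows cols : Int) (V : PySem.Set (Int × Int)) : Nat :=
  ((pvGrid rows cols).filter (fun x => !(PySem.Set.contains V x))).length

lemma pvGrid_mem_iff (rows cols a b : Int) :
    (a, b) ∈ pvGrid rows cols ↔ 0 ≤ a ∧ a < rows ∧ 0 ≤ b ∧ b < cols := by
  simp only [pvGrid, List.mem_flatMap, List.mem_map, PySem.List.mem_pyRange_one]
  constructor
  · rintro ⟨i, hi, j, hj, hij⟩
    cases hij
    exact ⟨hi.1, hi.2, hj.1, hj.2⟩
  · rintro ⟨h1, h2, h3, h4⟩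
    exact ⟨a, ⟨h1, h2⟩, b, ⟨h3, h4⟩, rfl⟩

-- A's push step and B's neighbour step, named
def pvPushA (maze : List (List String)) (rows cols : Int) (path' : List (Int × Int)) (c : Int × Int) :
    List ((Int × Int) × List (Int × Int)) → (Int × Int) → List ((Int × Int) × List (Int × Int)) :=
  fun st d =>
    if 0 ≤ c.1 + d.1 ∧ c.1 + d.1 < rows ∧ 0 ≤ c.2 + d.2 ∧ c.2 + d.2 < cols ∧
        (pvGetA maze (c.1 + d.1) (c.2 + d.2) = "." ∨ pvGetA maze (c.1 + d.1) (c.2 + d.2) = "E") then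
      ((c.1 + d.1, c.2 + d.2), path') :: st
    else st

def pvStepB (maze : List (List String)) (rows cols : Int) (endP : Int × Int) (fuel : Nat)
    (c : Int × Int) (path' : List (Int × Int)) :
    (PySem.Set (Int × Int) × List (List (Int × Int)) × Option (List (Int × Int))) → (Int × Int) →
    (PySem.Set (Int × Int) × List (List (Int × Int)) × Option (List (Int × Int))) :=
  fun acc d =>
    match acc with
    | (v, q, some w) => (v, q, some w)
    | (v, q, none) =>
      if 0 ≤ c.1 + d.1 ∧ c.1 + d.1 < rows ∧ 0 ≤ c.2 + d.2 ∧ c.2 + d.2 < cols ∧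
          (pvCellB maze (c.1 + d.1) (c.2 + d.2) = "." ∨ pvCellB maze (c.1 + d.1) (c.2 + d.2) = "E") then
        pvDfsB maze rows cols endP fuel (c.1 + d.1, c.2 + d.2) path' v q
      else (v, q, none)

-- B's dfs run over a whole stack of pending (cell, path) entries
def pvRunB (maze : List (List String)) (rows cols : Int) (endP : Int × Int) (fB : Nat) :
    List ((Int × Int) × List (Int × Int)) → PySem.Set (Int × Int) → List (List (Int × Int)) →
    PySem.Set (Int × Int) × List (List (Int × Int)) × Option (List (Int × Int))
  | [], V, ps => (V, ps, none)
  | (c, p) :: rest, V, ps =>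
    match pvDfsB maze rows cols endP fB c p V ps with
    | (v, q, some w) => (v, q, some w)
    | (v, q, none) => pvRunB maze rows cols endP fB rest v q

-- A's S/E scan, named (exactly the fold expression of the A port)
def pvScanA (maze : List (List String)) (rows cols : Int) :
    Option (Int × Int) × Option (Int × Int) :=
  (PySem.List.pyRange 0 rows 1).foldl (fun se i =>
    (PySem.List.pyRange 0 cols 1).foldl (fun (se : Option (Int × Int) × Option (Int × Int)) j =>
      let se1 := if pvGetA maze i j = "S" then (some (i, j), se.2) else se
      if pvGetA maze i j = "E" then (se1.1, some (i, j)) else se1) se) (none, none)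

lemma find_path_dfs_eq (maze : List (List String)) :
    find_path_dfs maze =
      match pvScanA maze (maze.length : Int) (((maze.headD []).length : Int)) with
      | (some s, some e) =>
        pvLoopA maze (maze.length : Int) (((maze.headD []).length : Int)) e
          (5 * (((maze.length : Int)).toNat * (((maze.headD []).length : Int)).toNat) + 2)
          [(s, [])] PySem.Set.empty []
      | _ => [] := rfl

lemma find_path_dfs_alt_eq (maze : List (List String)) :
    find_path_dfs_alt maze =
      match pvLocateB maze (maze.length : Int) (((maze.headD []).length : Int)) "S" with
      | none => []
      | some s =>
        match pvLocateB maze (maze.length : Int) (((maze.headD []).length : Int)) "E" with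
        | none => []
        | some e =>
          match pvDfsB maze (maze.length : Int) (((maze.headD []).length : Int)) e
              ((((maze.length : Int)).toNat * (((maze.headD []).length : Int)).toNat) + 1)
              s [] PySem.Set.empty [] with
          | (_, ps, some w) =>
            ps.map (fun p => pvRenderB maze p "@") ++ [pvRenderB maze w "p"]
          | (_, _, none) => [] := rfl

lemma pvDfsB_succ (maze : List (List String)) (rows cols : Int) (endP : Int × Int)
    (fuel : Nat) (c : Int × Int) (path : List (Int × Int)) (V : PySem.Set (Int × Int))
    (ps : List (List (Int × Int))) :
    pvDfsB maze rows cols endP (fuel + 1) c path V ps =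
      if PySem.Set.contains V c then (V, ps, none)
      else if c = endP then
        (PySem.Set.add V c, ps ++ [path ++ [c]], some (path ++ [c]))
      else
        pvDirsB.foldl (pvStepB maze rows cols endP fuel c (path ++ [c]))
          (PySem.Set.add V c, ps ++ [path ++ [c]], none) := rfl

lemma pvLoopA_nil (maze : List (List String)) (rows cols : Int) (endP : Int × Int)
    (f : Nat) (V : PySem.Set (Int × Int)) (st : List (List (List String))) :
    pvLoopA maze rows cols endP f [] V st = [] := by cases f <;> rfl

lemma pvLoopA_cons (maze : List (List String)) (rows cols : Int) (endP : Int × Int)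
    (f : Nat) (c : Int × Int) (p : List (Int × Int)) (rest : List ((Int × Int) × List (Int × Int)))
    (V : PySem.Set (Int × Int)) (st : List (List (List String))) :
    pvLoopA maze rows cols endP (f + 1) ((c, p) :: rest) V st =
      if PySem.Set.contains V c then pvLoopA maze rows cols endP f rest V st
      else if c = endP then
        (st ++ [pvMarkA maze (p ++ [c]) "@"]) ++ [pvMarkA maze (p ++ [c]) "p"]
      else
        pvLoopA maze rows cols endP f
          (pvDirsA.foldl (pvPushA maze rows cols (p ++ [c]) c) rest)
          (PySem.Set.add V c) (st ++ [pvMarkA maze (p ++ [c]) "@"]) := rfl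

-- generic filter-length facts
lemma pvFilterLenMono {a : Type} (l : List a) (p q : a → Bool)
    (h : ∀ x, q x = true → p x = true) : (l.filter q).length ≤ (l.filter p).length := by
  induction l with
  | nil => simp
  | cons x l ih =>
    by_cases hq : q x = true
    · simp only [List.filter_cons, hq, h x hq, if_true, List.length_cons]; omega
    · simp only [Bool.not_eq_true] at hq
      by_cases hp : p x = true <;>
        simp only [List.filter_cons, hq, hp, if_true, if_false, Bool.false_eq_true, List.length_cons] <;> omega

lemma pvFilterLenLt {a : Type} (l : List a) (p q : a → Bool)
    (h : ∀ x, q x = true → p x = true) (c : a) (hc : c ∈ l)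
    (hp : p c = true) (hq : q c = false) :
    (l.filter q).length < (l.filter p).length := by
  induction l with
  | nil => cases hc
  | cons x l ih =>
    rcases List.mem_cons.mp hc with rfl | hc2
    · have := pvFilterLenMono l p q h
      simp only [List.filter_cons, hp, hq, if_true, if_false, Bool.false_eq_true, List.length_cons]
      omega
    · have := ih hc2
      by_cases hqa : q x = true
      · simp only [List.filter_cons, hqa, h x hqa, if_true, List.length_cons]; omega
      · simp only [Bool.not_eq_true] at hqa
        by_cases hpa : p x = true <;>
          simp only [List.filter_cons, hqa, hpa, if_true, if_false, Bool.false_eq_true, List.length_cons] <;> omega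

lemma pvContains_add_self (V : PySem.Set (Int × Int)) (c : Int × Int) :
    PySem.Set.contains (PySem.Set.add V c) c = true := by
  rw [PySem.Set.contains_iff, PySem.Set.mem_add]; right; rfl

lemma pvContains_add_mono (V : PySem.Set (Int × Int)) (c x : Int × Int)
    (h : PySem.Set.contains V x = true) :
    PySem.Set.contains (PySem.Set.add V c) x = true := by
  rw [PySem.Set.contains_iff] at h ⊢; rw [PySem.Set.mem_add]; exact Or.inl h

lemma pvUnvis_mono (rows cols : Int) (V V2 : PySem.Set (Int × Int))
    (h : ∀ x, PySem.Set.contains V x = true → PySem.Set.contains V2 x = true) :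
    pvUnvis rows cols V2 ≤ pvUnvis rows cols V := by
  apply pvFilterLenMono
  intro x hx
  simp only [Bool.not_eq_true'] at hx ⊢
  by_contra hvx
  simp only [Bool.not_eq_false] at hvx
  rw [h x hvx] at hx
  cases hx

lemma pvUnvis_add_lt (rows cols : Int) (V : PySem.Set (Int × Int)) (c : Int × Int)
    (hc : c ∈ pvGrid rows cols) (hv : PySem.Set.contains V c = false) :
    pvUnvis rows cols (PySem.Set.add V c) < pvUnvis rows cols V := by
  apply pvFilterLenLt _ _ _ ?_ c hc
  · simp only [hv, Bool.not_false]
  · simp only [pvContains_add_self, Bool.not_true]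
  · intro x hx
    simp only [Bool.not_eq_true'] at hx ⊢
    by_contra hvx
    simp only [Bool.not_eq_false] at hvx
    rw [pvContains_add_mono V c x hvx] at hx
    cases hx

lemma pvUnvis_pos (rows cols : Int) (V : PySem.Set (Int × Int)) (c : Int × Int)
    (hc : c ∈ pvGrid rows cols) (hv : PySem.Set.contains V c = false) :
    1 ≤ pvUnvis rows cols V := by
  have hm : c ∈ (pvGrid rows cols).filter (fun x => !(PySem.Set.contains V x)) :=
    List.mem_filter.mpr (And.intro hc (by simp only [hv, Bool.not_false]))
  have := List.length_pos_of_mem hm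
  unfold pvUnvis
  omega

-- visited only grows through B's dfs
lemma pvDfsB_mono (maze : List (List String)) (rows cols : Int) (endP : Int × Int) :
    ∀ (fuel : Nat) (c : Int × Int) (path : List (Int × Int)) (V : PySem.Set (Int × Int))
      (ps : List (List (Int × Int))) (x : Int × Int),
      PySem.Set.contains V x = true →
      PySem.Set.contains (pvDfsB maze rows cols endP fuel c path V ps).1 x = true := by
  intro fuel
  induction fuel with
  | zero => intro c path V ps x h; exact h
  | succ fuel ih =>
    intro c path V ps x h
    rw [pvDfsB_succ]
    by_cases h1 : PySem.Set.contains V c = true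
    · simp only [h1, if_true]; exact h
    · simp only [Bool.not_eq_true] at h1
      simp only [h1, Bool.false_eq_true, if_false]
      by_cases h2 : c = endP
      · simp only [h2, if_true]; exact pvContains_add_mono V endP x h
      · simp only [h2, if_false]
        have hfold : ∀ (l : List (Int × Int))
            (acc : PySem.Set (Int × Int) × List (List (Int × Int)) × Option (List (Int × Int))),
            PySem.Set.contains acc.1 x = true →
            PySem.Set.contains ((l.foldl (pvStepB maze rows cols endP fuel c (path ++ [c])) acc)).1 x = true := by
          intro l
          induction l with
          | nil => intro acc ha; exact ha
          | cons d l ihl =>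
            intro acc ha
            simp only [List.foldl_cons]
            apply ihl
            rcases acc with ⟨v, q, o⟩
            cases o with
            | some w => exact ha
            | none =>
              simp only [pvStepB]
              split
              · exact ih _ _ _ _ x ha
              · exact ha
        exact hfold pvDirsB _ (pvContains_add_mono V c x h)

-- the result does not depend on the fuel once it exceeds the number of unvisited cells
lemma pvStable (maze : List (List String)) (rows cols : Int) (endP : Int × Int) :
    ∀ (n : Nat),
      (∀ (f g : Nat) (c : Int × Int) (path : List (Int × Int)) (V : PySem.Set (Int × Int))
        (ps : List (List (Int × Int))),
        c ∈ pvGrid rows cols → pvUnvis rows cols V ≤ n → n + 1 ≤ f → n + 1 ≤ g →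
        pvDfsB maze rows cols endP f c path V ps = pvDfsB maze rows cols endP g c path V ps) ∧
      (∀ (f g : Nat) (c : Int × Int) (path2 : List (Int × Int)) (l : List (Int × Int))
        (acc : PySem.Set (Int × Int) × List (List (Int × Int)) × Option (List (Int × Int))),
        pvUnvis rows cols acc.1 ≤ n → n + 1 ≤ f → n + 1 ≤ g →
        l.foldl (pvStepB maze rows cols endP f c path2) acc =
          l.foldl (pvStepB maze rows cols endP g c path2) acc) := by
  intro n
  induction n using Nat.strong_induction_on with
  | _ n IH =>
    have hvisit : ∀ (f g : Nat) (c : Int × Int) (path : List (Int × Int)) (V : PySem.Set (Int × Int))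
        (ps : List (List (Int × Int))),
        c ∈ pvGrid rows cols → pvUnvis rows cols V ≤ n → n + 1 ≤ f → n + 1 ≤ g →
        pvDfsB maze rows cols endP f c path V ps = pvDfsB maze rows cols endP g c path V ps := by
      intro f g c path V ps hc hn hf hg
      obtain ⟨f2, rfl⟩ : ∃ f2, f = f2 + 1 := ⟨f - 1, by omega⟩
      obtain ⟨g2, rfl⟩ : ∃ g2, g = g2 + 1 := ⟨g - 1, by omega⟩
      rw [pvDfsB_succ, pvDfsB_succ]
      by_cases h1 : PySem.Set.contains V c = true
      · simp only [h1, if_true]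
      · simp only [Bool.not_eq_true] at h1
        simp only [h1, Bool.false_eq_true, if_false]
        by_cases h2 : c = endP
        · simp only [h2, if_true]
        · simp only [h2, if_false]
          have hpos : 1 ≤ pvUnvis rows cols V := pvUnvis_pos rows cols V c hc h1
          have hlt : pvUnvis rows cols (PySem.Set.add V c) < pvUnvis rows cols V :=
            pvUnvis_add_lt rows cols V c hc h1
          exact (IH (n - 1) (by omega)).2 f2 g2 c (path ++ [c]) pvDirsB
            (PySem.Set.add V c, ps ++ [path ++ [c]], none)
            (by simp only; omega) (by omega) (by omega)
    refine ⟨hvisit, ?_⟩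
    intro f g c path2 l
    induction l with
    | nil => intro acc _ _ _; rfl
    | cons d l ihl =>
      intro acc hacc hf hg
      simp only [List.foldl_cons]
      rcases acc with ⟨v, q, o⟩
      cases o with
      | some w =>
        have hstep : pvStepB maze rows cols endP f c path2 (v, q, some w) d = (v, q, some w) := rfl
        have hstep2 : pvStepB maze rows cols endP g c path2 (v, q, some w) d = (v, q, some w) := rfl
        rw [hstep, hstep2]
        exact ihl (v, q, some w) hacc hf hg
      | none =>
        by_cases hgd : 0 ≤ c.1 + d.1 ∧ c.1 + d.1 < rows ∧ 0 ≤ c.2 + d.2 ∧ c.2 + d.2 < cols ∧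
            (pvCellB maze (c.1 + d.1) (c.2 + d.2) = "." ∨ pvCellB maze (c.1 + d.1) (c.2 + d.2) = "E")
        · have hmem : ((c.1 + d.1, c.2 + d.2) : Int × Int) ∈ pvGrid rows cols := by
            rw [pvGrid_mem_iff]; tauto
          have hveq := hvisit f g (c.1 + d.1, c.2 + d.2) path2 v q hmem hacc hf hg
          have hstep : pvStepB maze rows cols endP f c path2 (v, q, none) d =
              pvDfsB maze rows cols endP f (c.1 + d.1, c.2 + d.2) path2 v q := by
            simp only [pvStepB]; rw [if_pos hgd]
          have hstep2 : pvStepB maze rows cols endP g c path2 (v, q, none) d =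
              pvDfsB maze rows cols endP g (c.1 + d.1, c.2 + d.2) path2 v q := by
            simp only [pvStepB]; rw [if_pos hgd]
          rw [hstep, hstep2, ← hveq]
          have hm : pvUnvis rows cols (pvDfsB maze rows cols endP f (c.1 + d.1, c.2 + d.2) path2 v q).1 ≤ n :=
            le_trans (pvUnvis_mono rows cols v
              (pvDfsB maze rows cols endP f (c.1 + d.1, c.2 + d.2) path2 v q).1
              (fun x hx => pvDfsB_mono maze rows cols endP f _ _ _ _ x hx)) hacc
          exact ihl _ hm hf hg
        · have hstep : pvStepB maze rows cols endP f c path2 (v, q, none) d = (v, q, none) := by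
            simp only [pvStepB]; rw [if_neg hgd]
          have hstep2 : pvStepB maze rows cols endP g c path2 (v, q, none) d = (v, q, none) := by
            simp only [pvStepB]; rw [if_neg hgd]
          rw [hstep, hstep2]
          exact ihl (v, q, none) hacc hf hg

-- a finished (some-winner) accumulator is fixed by the neighbour fold
lemma pvFold_found (maze : List (List String)) (rows cols : Int) (endP : Int × Int)
    (fuel : Nat) (c : Int × Int) (path2 : List (Int × Int)) :
    ∀ (l : List (Int × Int)) (v : PySem.Set (Int × Int)) (q : List (List (Int × Int)))
      (w : List (Int × Int)),
      l.foldl (pvStepB maze rows cols endP fuel c path2) (v, q, some w) = (v, q, some w) := by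
  intro l
  induction l with
  | nil => intro v q w; rfl
  | cons d l ihl =>
    intro v q w
    simp only [List.foldl_cons]
    have : pvStepB maze rows cols endP fuel c path2 (v, q, some w) d = (v, q, some w) := rfl
    rw [this]
    exact ihl v q w

-- running B over the entries A pushes = B's neighbour fold, then the rest of the stack
lemma pvRunB_fold (maze : List (List String)) (rows cols : Int) (endP : Int × Int)
    (fB : Nat) (c : Int × Int) (path2 : List (Int × Int)) :
    ∀ (l : List (Int × Int)) (rest : List ((Int × Int) × List (Int × Int)))
      (V : PySem.Set (Int × Int)) (ps : List (List (Int × Int))),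
      pvRunB maze rows cols endP fB (l.foldr (fun d s => pvPushA maze rows cols path2 c s d) rest) V ps =
        (match l.foldl (pvStepB maze rows cols endP fB c path2) (V, ps, none) with
         | (v, q, some w) => (v, q, some w)
         | (v, q, none) => pvRunB maze rows cols endP fB rest v q) := by
  intro l
  induction l with
  | nil => intro rest V ps; rfl
  | cons d l ihl =>
    intro rest V ps
    simp only [List.foldr_cons, List.foldl_cons]
    by_cases hgd : 0 ≤ c.1 + d.1 ∧ c.1 + d.1 < rows ∧ 0 ≤ c.2 + d.2 ∧ c.2 + d.2 < cols ∧
        (pvGetA maze (c.1 + d.1) (c.2 + d.2) = "." ∨ pvGetA maze (c.1 + d.1) (c.2 + d.2) = "E")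
    · have hpush : pvPushA maze rows cols path2 c (l.foldr (fun d s => pvPushA maze rows cols path2 c s d) rest) d =
          ((c.1 + d.1, c.2 + d.2), path2) :: l.foldr (fun d s => pvPushA maze rows cols path2 c s d) rest := by
        unfold pvPushA; rw [if_pos hgd]
      have hstep : pvStepB maze rows cols endP fB c path2 (V, ps, none) d =
          pvDfsB maze rows cols endP fB (c.1 + d.1, c.2 + d.2) path2 V ps := by
        simp only [pvStepB]; rw [pvCellB_eq, if_pos hgd]
      rw [hpush, hstep]
      rcases hv : pvDfsB maze rows cols endP fB (c.1 + d.1, c.2 + d.2) path2 V ps with ⟨v2, q2, o⟩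
      cases o with
      | none =>
        simp only [pvRunB, hv]
        exact ihl rest v2 q2
      | some w =>
        simp only [pvRunB, hv]
        rw [pvFold_found maze rows cols endP fB c path2 l v2 q2 w]
    · have hpush : pvPushA maze rows cols path2 c (l.foldr (fun d s => pvPushA maze rows cols path2 c s d) rest) d =
          l.foldr (fun d s => pvPushA maze rows cols path2 c s d) rest := by
        unfold pvPushA; rw [if_neg hgd]
      have hstep : pvStepB maze rows cols endP fB c path2 (V, ps, none) d = (V, ps, none) := by
        simp only [pvStepB]; rw [pvCellB_eq, if_neg hgd]
      rw [hpush, hstep]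
      exact ihl rest V ps

lemma pvPushA_len (maze : List (List String)) (rows cols : Int) (path2 : List (Int × Int)) (c : Int × Int) :
    ∀ (l : List (Int × Int)) (rest : List ((Int × Int) × List (Int × Int))),
      (l.foldl (pvPushA maze rows cols path2 c) rest).length ≤ rest.length + l.length := by
  intro l
  induction l with
  | nil => intro rest; simp
  | cons d l ihl =>
    intro rest
    simp only [List.foldl_cons, List.length_cons]
    have h1 : (pvPushA maze rows cols path2 c rest d).length ≤ rest.length + 1 := by
      unfold pvPushA; split <;> simp
    have := ihl (pvPushA maze rows cols path2 c rest d)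
    omega

-- pushed entries: the cell is on the grid, the path's cells are all nonnegative
lemma pvPushA_inv (maze : List (List String)) (rows cols : Int) (path2 : List (Int × Int)) (c : Int × Int)
    (hpath2 : ∀ q ∈ path2, 0 ≤ q.1 ∧ 0 ≤ q.2) :
    ∀ (l : List (Int × Int)) (rest : List ((Int × Int) × List (Int × Int))),
      (∀ e ∈ rest, e.1 ∈ pvGrid rows cols ∧ ∀ q ∈ e.2, 0 ≤ q.1 ∧ 0 ≤ q.2) →
      ∀ e ∈ l.foldl (pvPushA maze rows cols path2 c) rest,
        e.1 ∈ pvGrid rows cols ∧ ∀ q ∈ e.2, 0 ≤ q.1 ∧ 0 ≤ q.2 := by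
  intro l
  induction l with
  | nil => intro rest h; exact h
  | cons d l ihl =>
    intro rest h
    simp only [List.foldl_cons]
    apply ihl
    intro e he
    unfold pvPushA at he
    split at he
    case isTrue hgd =>
      rcases List.mem_cons.mp he with rfl | he2
      · exact ⟨(pvGrid_mem_iff rows cols _ _).mpr (by tauto), hpath2⟩
      · exact h e he2
    case isFalse => exact h e he

-- ---------- the mark/render bridge ----------

-- the character at (i, j), shape-agnostic
def pvCharAt (m : List (List String)) (i j : Nat) : Option String :=
  m[i]?.bind (fun r => r[j]?)

lemma pvMarkA_cons (m : List (List String)) (c : Int × Int) (t : List (Int × Int)) (v : String) :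
    pvMarkA m (c :: t) v =
      pvMarkA (if pvGetA m c.1 c.2 = "." then pvSetA m c.1 c.2 v else m) t v := rfl

-- one marking step, seen through pvCharAt
lemma pvStep_charAt (m : List (List String)) (mark : String) (c : Int × Int)
    (h1 : 0 ≤ c.1) (h2 : 0 ≤ c.2) (i j : Nat) :
    pvCharAt (if pvGetA m c.1 c.2 = "." then pvSetA m c.1 c.2 mark else m) i j =
      (pvCharAt m i j).map (fun ch => if ch = "." ∧ ((i : Int), (j : Int)) = c then mark else ch) := by
  by_cases hbr : pvGetA m c.1 c.2 = "."
  · -- the branch fires: m has a "." at c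
    have hget : pvGetA m c.1 c.2 = ((m[c.1.toNat]?.getD [])[c.2.toNat]?).getD "" := by
      unfold pvGetA
      rw [PySem.List.pyGet?_of_nonneg _ h1, PySem.List.pyGet?_of_nonneg _ h2]
    rw [hget] at hbr
    rcases hrow : m[c.1.toNat]? with _ | r
    · rw [hrow] at hbr; simp at hbr
    · rw [hrow] at hbr
      simp only [Option.getD_some] at hbr
      rcases hcell : r[c.2.toNat]? with _ | ch
      · rw [hcell] at hbr; simp at hbr
      · rw [hcell] at hbr
        simp only [Option.getD_some] at hbr
        subst hbr
        rw [if_pos (by rw [hget, hrow]; simp only [Option.getD_some]; rw [hcell]; rfl)]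
        have hrlen : c.1.toNat < m.length := by
          by_contra hL
          rw [List.getElem?_eq_none (by omega)] at hrow
          cases hrow
        have hclen : c.2.toNat < r.length := by
          by_contra hL
          rw [List.getElem?_eq_none (by omega)] at hcell
          cases hcell
        have hsetA : pvSetA m c.1 c.2 mark = m.set c.1.toNat (r.set c.2.toNat mark) := by
          unfold pvSetA
          rw [List.getD_eq_getElem?_getD, hrow]
          rfl
        rw [hsetA]
        have hcnat : ((c.1.toNat : Int), (c.2.toNat : Int)) = c := by
          rw [Int.toNat_of_nonneg h1, Int.toNat_of_nonneg h2]
        by_cases hi : i = c.1.toNat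
        · rw [hi]
          unfold pvCharAt
          rw [List.getElem?_set_self hrlen, hrow]
          simp only [Option.bind_some]
          by_cases hj : j = c.2.toNat
          · rw [hj]
            rw [List.getElem?_set_self hclen, hcell]
            simp only [Option.map_some]
            rw [if_pos (show True ∧ ((c.1.toNat : Int), (c.2.toNat : Int)) = c from ⟨trivial, hcnat⟩)]
          · rw [List.getElem?_set_ne (by omega)]
            have hc : ¬ (((c.1.toNat : Int), (j : Int)) = c) := by
              intro hcc
              apply hj
              have h : (j : Int) = c.2 := by
                have := congrArg Prod.snd hcc
                simpa using this
              omega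
            rcases hcj : r[j]? with _ | ch2
            · rfl
            · simp only [Option.map_some]
              rw [if_neg (by tauto)]
        · unfold pvCharAt
          rw [List.getElem?_set_ne (by omega)]
          have hc : ¬ (((i : Int), (j : Int)) = c) := by
            intro hcc
            apply hi
            have h : (i : Int) = c.1 := by
              have := congrArg Prod.fst hcc
              simpa using this
            omega
          rcases hri : m[i]? with _ | r2
          · rfl
          · simp only [Option.bind_some]
            rcases hcj : r2[j]? with _ | ch2
            · rfl
            · simp only [Option.map_some]
              rw [if_neg (by tauto)]
  · -- the branch does not fire: the cell at c is not "."
    rw [if_neg hbr]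
    have hc : ∀ ch, pvCharAt m i j = some ch → ¬ (ch = "." ∧ ((i : Int), (j : Int)) = c) := by
      rintro ch hch ⟨hdot, hcc⟩
      apply hbr
      subst hdot
      have e1 : c.1.toNat = i := by
        have : (i : Int) = c.1 := congrArg Prod.fst hcc
        omega
      have e2 : c.2.toNat = j := by
        have : (j : Int) = c.2 := congrArg Prod.snd hcc
        omega
      unfold pvGetA
      rw [PySem.List.pyGet?_of_nonneg _ h1, PySem.List.pyGet?_of_nonneg _ h2, e1, e2]
      unfold pvCharAt at hch
      rcases hri : m[i]? with _ | r2
      · rw [hri] at hch; cases hch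
      · rw [hri] at hch
        simp only [Option.bind_some] at hch
        simp only [Option.getD_some]
        rw [hch]
        rfl
    rcases hch : pvCharAt m i j with _ | ch
    · rfl
    · simp only [Option.map_some]
      rw [if_neg (hc ch hch)]

lemma pvMarkA_charAt (mark : String) (hmk : mark ≠ ".") :
    ∀ (p : List (Int × Int)) (m : List (List String)),
      (∀ q ∈ p, 0 ≤ q.1 ∧ 0 ≤ q.2) →
      ∀ (i j : Nat),
        pvCharAt (pvMarkA m p mark) i j =
          (pvCharAt m i j).map (fun ch => if ch = "." ∧ ((i : Int), (j : Int)) ∈ p then mark else ch) := by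
  intro p
  induction p with
  | nil =>
    intro m _ i j
    simp only [pvMarkA, List.foldl_nil, List.not_mem_nil, and_false, if_false]
    rcases pvCharAt m i j <;> rfl
  | cons c t ih =>
    intro m hp i j
    rw [pvMarkA_cons]
    rw [ih _ (fun q hq => hp q (List.mem_cons_of_mem _ hq)) i j]
    rw [pvStep_charAt m mark c (hp c List.mem_cons_self).1 (hp c List.mem_cons_self).2 i j]
    rw [Option.map_map]
    rcases hch : pvCharAt m i j with _ | ch
    · rfl
    · simp only [Option.map_some, Function.comp]
      congr 1
      by_cases hdot : ch = "." <;>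
        by_cases hc : ((i : Int), (j : Int)) = c <;>
          by_cases ht : ((i : Int), (j : Int)) ∈ t <;>
            simp [hdot, hc, ht, List.mem_cons, hmk]

lemma pvRenderB_charAt (m : List (List String)) (p : List (Int × Int)) (mark : String) (i j : Nat) :
    pvCharAt (pvRenderB m p mark) i j =
      (pvCharAt m i j).map (fun ch => if ch = "." ∧ ((i : Int), (j : Int)) ∈ p then mark else ch) := by
  unfold pvCharAt pvRenderB
  rw [List.getElem?_map, PySem.List.getElem?_enumerate]
  rcases hri : m[i]? with _ | r
  · rfl
  · simp only [Option.map_some, Option.bind_some]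
    rw [List.getElem?_map, PySem.List.getElem?_enumerate]
    rcases hcj : r[j]? with _ | ch
    · rfl
    · simp only [Option.map_some, zero_add]

lemma pvMarkA_length (mark : String) :
    ∀ (p : List (Int × Int)) (m : List (List String)), (pvMarkA m p mark).length = m.length := by
  intro p
  induction p with
  | nil => intro m; rfl
  | cons c t ih =>
    intro m
    rw [pvMarkA_cons, ih]
    split
    · unfold pvSetA; rw [List.length_set]
    · rfl

lemma pvMarkA_rowlen (mark : String) :
    ∀ (p : List (Int × Int)) (m : List (List String)) (i : Nat),
      ((pvMarkA m p mark)[i]?).map List.length = (m[i]?).map List.length := by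
  intro p
  induction p with
  | nil => intro m i; rfl
  | cons c t ih =>
    intro m i
    rw [pvMarkA_cons, ih]
    by_cases hbr : pvGetA m c.1 c.2 = "."
    · rw [if_pos hbr]
      unfold pvSetA
      by_cases hi : i = c.1.toNat
      · rw [hi]
        by_cases hlen : c.1.toNat < m.length
        · rw [List.getElem?_set_self (by simpa using hlen), List.getElem?_eq_getElem hlen]
          simp [List.length_set, List.getD_eq_getElem?_getD, List.getElem?_eq_getElem hlen]
        · have h1 : m.length ≤ c.1.toNat := by omega
          rw [List.getElem?_eq_none (by simpa using h1), List.getElem?_eq_none h1]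
      · rw [List.getElem?_set_ne (by omega)]
    · rw [if_neg hbr]

lemma pvMark_eq_render (m : List (List String)) (p : List (Int × Int)) (mark : String)
    (hmk : mark ≠ ".") (hp : ∀ q ∈ p, 0 ≤ q.1 ∧ 0 ≤ q.2) :
    pvMarkA m p mark = pvRenderB m p mark := by
  apply List.ext_getElem?
  intro i
  have hlen1 : (pvMarkA m p mark).length = m.length := pvMarkA_length mark p m
  have hlen2 : (pvRenderB m p mark).length = m.length := by
    unfold pvRenderB
    rw [List.length_map, PySem.List.length_enumerate]
  by_cases hi : i < m.length
  · rcases h1 : (pvMarkA m p mark)[i]? with _ | r1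
    · rw [List.getElem?_eq_none_iff] at h1; omega
    · rcases h2 : (pvRenderB m p mark)[i]? with _ | r2
      · rw [List.getElem?_eq_none_iff] at h2; omega
      · congr 1
        have hr1len : r1.length = ((m[i]?).map List.length).getD 0 := by
          have := pvMarkA_rowlen mark p m i
          rw [h1] at this
          rw [← this]; rfl
        have hr2len : r2.length = ((m[i]?).map List.length).getD 0 := by
          unfold pvRenderB at h2
          rw [List.getElem?_map, PySem.List.getElem?_enumerate] at h2
          rcases hri : m[i]? with _ | r
          · rw [hri] at h2; cases h2
          · rw [hri] at h2
            simp only [Option.map_some] at h2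
            cases h2
            simp [List.length_map, PySem.List.length_enumerate]
        apply List.ext_getElem?
        intro j
        have hc1 : r1[j]? = pvCharAt (pvMarkA m p mark) i j := by
          unfold pvCharAt; rw [h1]; rfl
        have hc2 : r2[j]? = pvCharAt (pvRenderB m p mark) i j := by
          unfold pvCharAt; rw [h2]; rfl
        rw [hc1, hc2, pvMarkA_charAt mark hmk p m hp i j, pvRenderB_charAt m p mark i j]
  · rw [List.getElem?_eq_none (by omega), List.getElem?_eq_none (by omega)]

-- ---------- MAIN: A's stack loop computes B's two phases ----------

lemma pvMain (maze : List (List String)) (cols : Int) (endP : Int × Int) :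
    ∀ (fA : Nat) (stack : List ((Int × Int) × List (Int × Int))) (V : PySem.Set (Int × Int))
      (ps : List (List (Int × Int))) (fB : Nat),
      (∀ e ∈ stack, e.1 ∈ pvGrid (maze.length : Int) cols ∧ ∀ q ∈ e.2, 0 ≤ q.1 ∧ 0 ≤ q.2) →
      stack.length + 5 * pvUnvis (maze.length : Int) cols V + 1 ≤ fA →
      pvUnvis (maze.length : Int) cols V + 1 ≤ fB →
      pvLoopA maze (maze.length : Int) cols endP fA stack V
          (ps.map (fun p => pvRenderB maze p "@")) =
        (match pvRunB maze (maze.length : Int) cols endP fB stack V ps with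
         | (_, ps2, some w) => ps2.map (fun p => pvRenderB maze p "@") ++ [pvRenderB maze w "p"]
         | (_, _, none) => []) := by
  intro fA
  induction fA with
  | zero => intro stack V ps fB _ h2 _; omega
  | succ fA ih =>
    intro stack V ps fB hg hA hB
    match stack with
    | [] => rw [pvLoopA_nil]; rfl
    | (c, p) :: rest =>
      obtain ⟨g, rfl⟩ : ∃ g, fB = g + 1 := ⟨fB - 1, by omega⟩
      rw [pvLoopA_cons]
      have hcg : c ∈ pvGrid (maze.length : Int) cols := (hg (c, p) List.mem_cons_self).1
      have hpn : ∀ q ∈ p, 0 ≤ q.1 ∧ 0 ≤ q.2 := (hg (c, p) List.mem_cons_self).2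
      have hcn : 0 ≤ c.1 ∧ 0 ≤ c.2 := by
        rcases c with ⟨a, b⟩
        have := (pvGrid_mem_iff (maze.length : Int) cols a b).mp hcg
        exact ⟨this.1, this.2.2.1⟩
      have hpn' : ∀ q ∈ p ++ [c], 0 ≤ q.1 ∧ 0 ≤ q.2 := by
        intro q hq
        rcases List.mem_append.mp hq with h | h
        · exact hpn q h
        · rcases List.mem_singleton.mp h with rfl; exact hcn
      by_cases h1 : PySem.Set.contains V c = true
      · simp only [h1, if_true]
        have hv : pvDfsB maze (maze.length : Int) cols endP (g + 1) c p V ps = (V, ps, none) := by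
          rw [pvDfsB_succ]; simp only [h1, if_true]
        have hrhs : pvRunB maze (maze.length : Int) cols endP (g + 1) ((c, p) :: rest) V ps =
            pvRunB maze (maze.length : Int) cols endP (g + 1) rest V ps := by
          simp only [pvRunB, hv]
        rw [hrhs]
        apply ih rest V ps (g + 1) (fun e he => hg e (List.mem_cons_of_mem _ he))
          (by simp only [List.length_cons] at hA; omega) hB
      · simp only [Bool.not_eq_true] at h1
        simp only [h1, Bool.false_eq_true, if_false]
        have hmr : pvMarkA maze (p ++ [c]) "@" = pvRenderB maze (p ++ [c]) "@" :=
          pvMark_eq_render maze (p ++ [c]) "@" (by decide) hpn'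
        by_cases h2 : c = endP
        · subst h2
          rw [if_pos rfl]
          have hv : pvDfsB maze (maze.length : Int) cols c (g + 1) c p V ps =
              (PySem.Set.add V c, ps ++ [p ++ [c]], some (p ++ [c])) := by
            rw [pvDfsB_succ]
            rw [if_neg (by simp only [h1]; exact Bool.false_ne_true), if_pos rfl]
          have hrhs : pvRunB maze (maze.length : Int) cols c (g + 1) ((c, p) :: rest) V ps =
              (PySem.Set.add V c, ps ++ [p ++ [c]], some (p ++ [c])) := by
            simp only [pvRunB, hv]
          rw [hrhs]
          have hmp : pvMarkA maze (p ++ [c]) "p" = pvRenderB maze (p ++ [c]) "p" :=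
            pvMark_eq_render maze (p ++ [c]) "p" (by decide) hpn'
          simp only [List.map_append, List.map_cons, List.map_nil]
          rw [hmr, hmp]
        · simp only [h2, if_false]
          have hlt : pvUnvis (maze.length : Int) cols (PySem.Set.add V c) < pvUnvis (maze.length : Int) cols V :=
            pvUnvis_add_lt _ _ V c hcg h1
          have hpos : 1 ≤ pvUnvis (maze.length : Int) cols V := pvUnvis_pos _ _ V c hcg h1
          have hlen := pvPushA_len maze (maze.length : Int) cols (p ++ [c]) c pvDirsA rest
          have hst' : (ps.map (fun p => pvRenderB maze p "@")) ++ [pvMarkA maze (p ++ [c]) "@"] =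
              ((ps ++ [p ++ [c]]).map (fun p => pvRenderB maze p "@")) := by
            rw [hmr]; simp [List.map_append]
          rw [hst']
          have hstep1 := ih (pvDirsA.foldl (pvPushA maze (maze.length : Int) cols (p ++ [c]) c) rest)
            (PySem.Set.add V c) (ps ++ [p ++ [c]]) (g + 1)
            (pvPushA_inv maze (maze.length : Int) cols (p ++ [c]) c hpn' pvDirsA rest
              (fun e he => hg e (List.mem_cons_of_mem _ he)))
            (by have hdl : pvDirsA.length = 4 := rfl
                simp only [List.length_cons] at hA
                omega)
            (by omega)
          rw [hstep1]
          have hrevd : pvDirsA = pvDirsB.reverse := by decide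
          have hfoldr : pvDirsA.foldl (pvPushA maze (maze.length : Int) cols (p ++ [c]) c) rest =
              pvDirsB.foldr (fun d s => pvPushA maze (maze.length : Int) cols (p ++ [c]) c s d) rest := by
            rw [hrevd, List.foldl_reverse]
          rw [hfoldr, pvRunB_fold]
          -- stability: the inner fold of dfs (g+1) uses fuel g
          have hstab : pvDirsB.foldl (pvStepB maze (maze.length : Int) cols endP (g + 1) c (p ++ [c]))
              (PySem.Set.add V c, ps ++ [p ++ [c]], none) =
              pvDirsB.foldl (pvStepB maze (maze.length : Int) cols endP g c (p ++ [c]))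
              (PySem.Set.add V c, ps ++ [p ++ [c]], none) := by
            apply (pvStable maze (maze.length : Int) cols endP (pvUnvis (maze.length : Int) cols (PySem.Set.add V c))).2
            · simp only; omega
            · omega
            · omega
          rw [hstab]
          have hv : pvDfsB maze (maze.length : Int) cols endP (g + 1) c p V ps =
              pvDirsB.foldl (pvStepB maze (maze.length : Int) cols endP g c (p ++ [c]))
                (PySem.Set.add V c, ps ++ [p ++ [c]], none) := by
            rw [pvDfsB_succ]
            rw [if_neg (by simp only [h1]; decide), if_neg h2]
          have hrhs : pvRunB maze (maze.length : Int) cols endP (g + 1) ((c, p) :: rest) V ps =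
              (match pvDirsB.foldl (pvStepB maze (maze.length : Int) cols endP g c (p ++ [c]))
                  (PySem.Set.add V c, ps ++ [p ++ [c]], none) with
               | (v, q, some w) => (v, q, some w)
               | (v, q, none) => pvRunB maze (maze.length : Int) cols endP (g + 1) rest v q) := by
            simp only [pvRunB]
            rw [hv]
          rw [hrhs]

-- ---------- the two S/E searches agree ----------

-- overwrite-fold over a list = first match over its reverse
lemma pvFoldOverwrite {α : Type} (P : α → Prop) [DecidablePred P] :
    ∀ (l : List α) (o : Option α),
      l.foldl (fun acc x => if P x then some x else acc) o =
        (l.reverse.find? (fun x => decide (P x))).or o := by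
  intro l
  induction l with
  | nil => intro o; rfl
  | cons x t ih =>
    intro o
    simp only [List.foldl_cons, List.reverse_cons]
    rw [ih, List.find?_append]
    by_cases hx : P x
    · simp [hx]
    · simp [hx]

lemma pvScanA_eq_locate (m : List (List String)) (rows cols : Int) :
    pvScanA m rows cols = (pvLocateB m rows cols "S", pvLocateB m rows cols "E") := by
  have hbody : ∀ (i : Int),
      (fun (se : Option (Int × Int) × Option (Int × Int)) (j : Int) =>
        let se1 := if pvGetA m i j = "S" then (some (i, j), se.2) else se
        if pvGetA m i j = "E" then (se1.1, some (i, j)) else se1) =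
      (fun (se : Option (Int × Int) × Option (Int × Int)) (j : Int) =>
        (if pvGetA m i j = "S" then some (i, j) else se.1,
         if pvGetA m i j = "E" then some (i, j) else se.2)) := by
    intro i
    funext se j
    by_cases hS : pvGetA m i j = "S"
    · simp [hS]
    · by_cases hE : pvGetA m i j = "E"
      · simp [hE]
      · simp [hS, hE]
  have hnest : pvScanA m rows cols =
      (pvGrid rows cols).foldl (fun se x =>
        (if pvGetA m x.1 x.2 = "S" then some x else se.1,
         if pvGetA m x.1 x.2 = "E" then some x else se.2)) (none, none) := by
    unfold pvScanA pvGrid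
    rw [List.foldl_flatMap]
    congr 1
    funext se i
    rw [List.foldl_map, hbody i]
  rw [hnest]
  have hsplit : (pvGrid rows cols).foldl (fun se x =>
        (if pvGetA m x.1 x.2 = "S" then some x else se.1,
         if pvGetA m x.1 x.2 = "E" then some x else se.2)) (none, none) =
      ((pvGrid rows cols).foldl (fun o x => if pvGetA m x.1 x.2 = "S" then some x else o) none,
       (pvGrid rows cols).foldl (fun o x => if pvGetA m x.1 x.2 = "E" then some x else o) none) := by
    exact PySem.List.foldl_prod_mk
      (fun o x => if pvGetA m x.1 x.2 = "S" then some x else o)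
      (fun o x => if pvGetA m x.1 x.2 = "E" then some x else o)
      (pvGrid rows cols) none none
  rw [hsplit]
  have hlist : (((PySem.List.pyRange 0 rows 1).reverse).flatMap (fun i =>
      ((PySem.List.pyRange 0 cols 1).reverse).map (fun j => ((i : Int), j)))) =
      (pvGrid rows cols).reverse := by
    unfold pvGrid
    rw [List.reverse_flatMap]
    congr 1
    funext i
    simp [Function.comp, List.map_reverse]
  have hpred : ∀ (t : String),
      (fun (p : Int × Int) => pvCellB m p.1 p.2 == t) =
      (fun (x : Int × Int) => decide (pvGetA m x.1 x.2 = t)) := by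
    intro t
    funext x
    rw [pvCellB_eq]
    by_cases h : pvGetA m x.1 x.2 = t <;> simp [h]
  unfold pvLocateB
  rw [hlist, hpred "S", hpred "E"]
  rw [pvFoldOverwrite (fun x : Int × Int => pvGetA m x.1 x.2 = "S"),
      pvFoldOverwrite (fun x : Int × Int => pvGetA m x.1 x.2 = "E")]
  simp [Option.or_none]

lemma pvLocateB_grid (m : List (List String)) (rows cols : Int) (t : String) (s : Int × Int)
    (h : pvLocateB m rows cols t = some s) : s ∈ pvGrid rows cols := by
  unfold pvLocateB at h
  have hmem := List.mem_of_find?_eq_some h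
  rw [List.mem_flatMap] at hmem
  rcases hmem with ⟨i, hi, hmap⟩
  rw [List.mem_map] at hmap
  rcases hmap with ⟨j, hj, rfl⟩
  rw [List.mem_reverse] at hi hj
  rw [pvGrid_mem_iff]
  have hi2 := PySem.List.mem_pyRange_one.mp hi
  have hj2 := PySem.List.mem_pyRange_one.mp hj
  exact ⟨hi2.1, hi2.2, hj2.1, hj2.2⟩

lemma pvUnvis_empty (rows cols : Int) :
    pvUnvis rows cols PySem.Set.empty ≤ rows.toNat * cols.toNat := by
  unfold pvUnvis
  have h1 : ((pvGrid rows cols).filter (fun x => !(PySem.Set.contains PySem.Set.empty x))).length ≤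
      (pvGrid rows cols).length := List.length_filter_le _ _
  have h2 : (pvGrid rows cols).length = rows.toNat * cols.toNat := by
    simp only [pvGrid, List.length_flatMap, List.length_map, PySem.List.length_pyRange_one]
    simp only [List.map_const']
    rw [List.sum_replicate, PySem.List.length_pyRange_one]
    simp [smul_eq_mul]
  omega

-- ===== VERDICT (by name: the statement is the Claim_ definition above) =====
theorem find_path_dfs_spec : Claim_equal_find_path_dfs := by
  unfold Claim_equal_find_path_dfs
  intro maze _ _
  unfold Spec_find_path_dfs
  rw [find_path_dfs_eq, find_path_dfs_alt_eq, pvScanA_eq_locate]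
  rcases hS : pvLocateB maze (maze.length : Int) (((maze.headD []).length : Int)) "S" with _ | s
  · rfl
  · rcases hE : pvLocateB maze (maze.length : Int) (((maze.headD []).length : Int)) "E" with _ | e
    · rfl
    · have hs : s ∈ pvGrid (maze.length : Int) (((maze.headD []).length : Int)) :=
        pvLocateB_grid maze _ _ "S" s hS
      have hu := pvUnvis_empty (maze.length : Int) (((maze.headD []).length : Int))
      have hmain := pvMain maze (((maze.headD []).length : Int)) e
        (5 * (((maze.length : Int)).toNat * (((maze.headD []).length : Int)).toNat) + 2)
        [(s, [])] PySem.Set.empty []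
        ((((maze.length : Int)).toNat * (((maze.headD []).length : Int)).toNat) + 1)
        (by intro x hx
            simp only [List.mem_singleton] at hx
            subst hx
            exact ⟨hs, by intro q hq; cases hq⟩)
        (by simp only [List.length_cons, List.length_nil]; omega)
        (by omega)
      simp only [List.map_nil] at hmain
      show pvLoopA maze (maze.length : Int) (((maze.headD []).length : Int)) e
          (5 * ((((maze.length : Int))).toNat * ((((maze.headD []).length : Int))).toNat) + 2)
          [(s, [])] PySem.Set.empty [] =
        match pvDfsB maze (maze.length : Int) (((maze.headD []).length : Int)) e
            (((((maze.length : Int))).toNat * ((((maze.headD []).length : Int))).toNat) + 1)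
            s [] PySem.Set.empty [] with
        | (_, ps, some w) => ps.map (fun p => pvRenderB maze p "@") ++ [pvRenderB maze w "p"]
        | (_, _, none) => []
      rw [hmain]
      rcases hv : pvDfsB maze (maze.length : Int) (((maze.headD []).length : Int)) e
          ((((maze.length : Int)).toNat * (((maze.headD []).length : Int)).toNat) + 1)
          s [] PySem.Set.empty [] with ⟨v2, q2, o⟩
      cases o <;> simp only [pvRunB, hv]
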